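-- pv_equiv track=rewrite | github.com/LP-RG/subxpat | translator_to_forallZ3.py | approximate_implicit_circuit
-- ===== SOURCE A (Python) =====
-- from typing import Iterable, List, Callable, Any, Union, Tuple
--
-- def generate_and_join(function: Callable[..., Iterable[str]],
--                       ranges: List[Union[int, Iterable]],
--                       joiner: str,
--                       __internal: List[int] = []) -> str:
--     """
--     Args:
--         function (Callable[..., str]): it must take in one argument per element in ranges.\
--             If 'ranges' contains iterables then the function needs 2 arguments for that (index, value).
--     """
--
--     strings = []
--
--     if len(ranges) == 1:
--         # end case
--         if type(ranges[0]) is int: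
--             for i in range(ranges[0]):
--                 strings.extend(function(*__internal, i))
--         else:
--             for i, v in enumerate(ranges[0]):
--                 strings.extend(function(*__internal, i, v))
--
--     else:
--         # middle case
--         if type(ranges[0]) is int:
--             for i in range(ranges[0]):
--                 strings.append(generate_and_join(function, ranges[1:], joiner, __internal + [i]))
--         else:
--             for i, v in enumerate(ranges[0]):
--                 strings.append(generate_and_join(function, ranges[1:], joiner, __internal + [i, v]))
--
--     return joiner.join(strings)
--
-- def approximate_implicit_circuit(trees_per_output: int,
--                                  inputs_count: int, outputs_count: int) -> str:
--
--     # create all outputs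
--     outputs: 'list[str]' = []
--     for output_id in range(outputs_count):
--         # create all trees
--         trees = []
--         for tree_id in range(trees_per_output):
--             tree = generate_implicit_tree(output_id, tree_id, inputs_count)
--             trees.append(tree)
--
--         outputs.append(f"Or({', '.join(trees)})")
--
--     # create integer output
--     return generate_implicit_int_output(outputs)
--
-- def generate_implicit_tree(output_id: int, tree_id: int,
--                            inputs_count: int) -> str:
--     def generator(_0, o_id, _1, t_id, i):
--         p_s = f"p_o{o_id}_t{t_id}_i{i}_s"
--         p_l = f"p_o{o_id}_t{t_id}_i{i}_l"
--         inp = f"i{i}"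
--         return [f"Or(Not({p_s}), {p_l} == {inp})"]
--
--     string = generate_and_join(generator, [[output_id], [tree_id], inputs_count], ", ")
--     return f"And({string})"
--
-- def generate_implicit_int_output(outputs: List[str]) -> str:
--     def generator(o_id, o_gates):
--         return [f"IntVal({2 ** o_id}) * And(p_o{o_id}, {o_gates})"]
--
--     string = generate_and_join(generator, [outputs], ',\n    ')
--     return f"Sum({string})"
-- ===== SOURCE B (Python) =====
-- def approximate_implicit_circuit(trees_per_output: int,
--                                  inputs_count: int, outputs_count: int) -> str:
--     # Simpler: one flat expression of nested comprehensions, no generic recursive dispatcher.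
--     return "Sum(" + ",\n    ".join(
--         f"IntVal({2 ** o}) * And(p_o{o}, "
--         + ("Or(" + ", ".join(
--             "And(" + ", ".join(
--                 "Or(Not(" + f"p_o{o}_t{t}_i{i}_s" + "), "
--                 + f"p_o{o}_t{t}_i{i}_l" + " == " + f"i{i}" + ")"
--                 for i in range(inputs_count)) + ")"
--             for t in range(trees_per_output)) + ")") + ")"
--         for o in range(outputs_count)) + ")"
-- ===== Notes on version B (the rewrite author's own statement) =====
-- stated objective: simpler
-- what changed: Replaced the generic recursive multi-range dispatcher generate_and_join (callbacks, heterogeneous range lists, accumulated __internal args) with one flat expression of nested comprehensions joined directly.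
import Mathlib
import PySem

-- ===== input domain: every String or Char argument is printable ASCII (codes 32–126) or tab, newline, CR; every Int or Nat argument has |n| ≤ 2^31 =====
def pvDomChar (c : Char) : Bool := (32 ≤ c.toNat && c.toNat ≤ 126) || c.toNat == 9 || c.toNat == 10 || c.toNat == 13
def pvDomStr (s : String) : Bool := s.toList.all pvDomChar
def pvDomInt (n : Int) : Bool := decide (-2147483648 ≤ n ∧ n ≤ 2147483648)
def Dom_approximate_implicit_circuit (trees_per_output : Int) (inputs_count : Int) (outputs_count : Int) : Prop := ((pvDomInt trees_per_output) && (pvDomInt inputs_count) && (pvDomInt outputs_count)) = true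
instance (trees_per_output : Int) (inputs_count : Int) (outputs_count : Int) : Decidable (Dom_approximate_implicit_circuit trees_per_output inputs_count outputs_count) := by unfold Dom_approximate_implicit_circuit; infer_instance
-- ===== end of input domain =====

-- B inlines A's generic recursive dispatcher generate_and_join into flat nested loops; objective: simpler (same output string, same cost).

-- ===== PORT A =====
-- A's dynamic "__internal" argument list mixes ints and strings; PVal models that.
inductive PVal
  | int : Int → PVal
  | str : String → PVal
deriving DecidableEq, Repr

-- A's 'ranges' entries are either an int (range(n)) or an iterable (enumerated).
inductive Rng
  | int : Int → Rng
  | iter : List PVal → Rng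
deriving DecidableEq, Repr

-- literal port of generate_and_join (the [] case is unreachable from A's call sites;
-- Python would raise IndexError there, we return the joined empty list)
def generate_and_join (f : List PVal → List String) (ranges : List Rng) (j : String)
    (internal : List PVal) : String :=
  match ranges with
  | [] => PySem.Str.join j []
  | [.int n] =>
      PySem.Str.join j ((PySem.List.pyRange 0 n 1).foldl
        (fun acc i => acc ++ f (internal ++ [.int i])) [])
  | [.iter vs] =>
      PySem.Str.join j ((PySem.List.enumerate vs 0).foldl
        (fun acc p => acc ++ f (internal ++ [.int p.1, p.2])) [])
  | .int n :: r :: rest =>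
      PySem.Str.join j ((PySem.List.pyRange 0 n 1).foldl
        (fun acc i => acc ++ [generate_and_join f (r :: rest) j (internal ++ [.int i])]) [])
  | .iter vs :: r :: rest =>
      PySem.Str.join j ((PySem.List.enumerate vs 0).foldl
        (fun acc p => acc ++ [generate_and_join f (r :: rest) j (internal ++ [.int p.1, p.2])]) [])

-- the nested 'generator' of generate_implicit_tree (helper stays a helper)
def tree_generator (args : List PVal) : List String :=
  match args with
  | [_, .int o_id, _, .int t_id, .int i] =>
      ["Or(Not(" ++
         ("p_o" ++ PySem.Int.toStr o_id ++ "_t" ++ PySem.Int.toStr t_id ++ "_i" ++ PySem.Int.toStr i ++ "_s") ++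
       "), " ++
         ("p_o" ++ PySem.Int.toStr o_id ++ "_t" ++ PySem.Int.toStr t_id ++ "_i" ++ PySem.Int.toStr i ++ "_l") ++
       " == " ++ ("i" ++ PySem.Int.toStr i) ++ ")"]
  | _ => []

def generate_implicit_tree (output_id : Int) (tree_id : Int) (inputs_count : Int) : String :=
  "And(" ++ generate_and_join tree_generator [.iter [.int output_id], .iter [.int tree_id], .int inputs_count] ", " [] ++ ")"

-- the nested 'generator' of generate_implicit_int_output; o_id is an enumerate index,
-- hence ≥ 0, so Python's 2 ** o_id is exactly 2 ^ o_id.toNat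
def int_output_generator (args : List PVal) : List String :=
  match args with
  | [.int o_id, .str o_gates] =>
      ["IntVal(" ++ PySem.Int.toStr (2 ^ o_id.toNat) ++ ") * And(p_o" ++ PySem.Int.toStr o_id ++ ", " ++ o_gates ++ ")"]
  | _ => []

def generate_implicit_int_output (outputs : List String) : String :=
  "Sum(" ++ generate_and_join int_output_generator [.iter (outputs.map PVal.str)] ",\n    " [] ++ ")"

def approximate_implicit_circuit (trees_per_output : Int) (inputs_count : Int) (outputs_count : Int) : String :=
  let outputs := (PySem.List.pyRange 0 outputs_count 1).foldl (fun acc output_id =>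
    let trees := (PySem.List.pyRange 0 trees_per_output 1).foldl (fun acc2 tree_id =>
      acc2 ++ [generate_implicit_tree output_id tree_id inputs_count]) []
    acc ++ ["Or(" ++ PySem.Str.join ", " trees ++ ")"]) []
  generate_implicit_int_output outputs

-- ===== PORT B =====
def approximate_implicit_circuit_alt (trees_per_output : Int) (inputs_count : Int) (outputs_count : Int) : String :=
  "Sum(" ++ PySem.Str.join ",\n    " ((PySem.List.pyRange 0 outputs_count 1).map (fun o =>
    "IntVal(" ++ PySem.Int.toStr (2 ^ o.toNat) ++ ") * And(p_o" ++ PySem.Int.toStr o ++ ", " ++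
    ("Or(" ++ PySem.Str.join ", " ((PySem.List.pyRange 0 trees_per_output 1).map (fun t =>
      "And(" ++ PySem.Str.join ", " ((PySem.List.pyRange 0 inputs_count 1).map (fun i =>
        "Or(Not(" ++
          ("p_o" ++ PySem.Int.toStr o ++ "_t" ++ PySem.Int.toStr t ++ "_i" ++ PySem.Int.toStr i ++ "_s") ++
        "), " ++
          ("p_o" ++ PySem.Int.toStr o ++ "_t" ++ PySem.Int.toStr t ++ "_i" ++ PySem.Int.toStr i ++ "_l") ++
        " == " ++ ("i" ++ PySem.Int.toStr i) ++ ")")) ++ ")")) ++ ")") ++ ")")) ++ ")"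

-- ===== PRECONDITION & SPEC =====
def Spec_approximate_implicit_circuit (trees_per_output : Int) (inputs_count : Int) (outputs_count : Int) (out : String) : Prop := out = approximate_implicit_circuit_alt trees_per_output inputs_count outputs_count
instance (trees_per_output : Int) (inputs_count : Int) (outputs_count : Int) (out : String) : Decidable (Spec_approximate_implicit_circuit trees_per_output inputs_count outputs_count out) := by unfold Spec_approximate_implicit_circuit; infer_instance

-- ===== CLAIM (what is proved, stated in full; the proofs are below) =====
def Claim_equal_approximate_implicit_circuit : Prop := ∀ (trees_per_output : Int) (inputs_count : Int) (outputs_count : Int), Dom_approximate_implicit_circuit trees_per_output inputs_count outputs_count → Spec_approximate_implicit_circuit trees_per_output inputs_count outputs_count (approximate_implicit_circuit trees_per_output inputs_count outputs_count)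

-- ===== LEMMAS AND PROOFS =====

theorem flatMap_sing {α β : Type} (g : α → β) (l : List α) :
    l.flatMap (fun x => [g x]) = l.map g := by
  induction l with
  | nil => rfl
  | cons x xs ih => simp [List.flatMap_cons, ih]

theorem str_join_singleton (j s : String) : PySem.Str.join j [s] = s := by
  simp [PySem.Str.join, PySem.Chars.join, List.intercalate]

theorem gaj_iter_cons (f : List PVal → List String) (v : PVal) (r : Rng) (rest : List Rng)
    (j : String) (internal : List PVal) :
    generate_and_join f (.iter [v] :: r :: rest) j internal
      = generate_and_join f (r :: rest) j (internal ++ [.int 0, v]) := by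
  simp [generate_and_join, PySem.List.enumerate, str_join_singleton]

theorem gaj_int_end (f : List PVal → List String) (n : Int) (j : String) (internal : List PVal) :
    generate_and_join f [.int n] j internal
      = PySem.Str.join j ((PySem.List.pyRange 0 n 1).flatMap (fun i => f (internal ++ [.int i]))) := by
  simp [generate_and_join, List.flatMap_def]

theorem gaj_iter_end (f : List PVal → List String) (vs : List PVal) (j : String) (internal : List PVal) :
    generate_and_join f [.iter vs] j internal
      = PySem.Str.join j ((PySem.List.enumerate vs 0).flatMap
          (fun p => f (internal ++ [.int p.1, p.2]))) := by
  simp [generate_and_join, List.flatMap_def]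

theorem tree_eq (o t ic : Int) :
    generate_implicit_tree o t ic
      = "And(" ++ PySem.Str.join ", " ((PySem.List.pyRange 0 ic 1).map (fun i =>
        "Or(Not(" ++
          ("p_o" ++ PySem.Int.toStr o ++ "_t" ++ PySem.Int.toStr t ++ "_i" ++ PySem.Int.toStr i ++ "_s") ++
        "), " ++
          ("p_o" ++ PySem.Int.toStr o ++ "_t" ++ PySem.Int.toStr t ++ "_i" ++ PySem.Int.toStr i ++ "_l") ++
        " == " ++ ("i" ++ PySem.Int.toStr i) ++ ")")) ++ ")" := by
  rw [generate_implicit_tree, gaj_iter_cons, gaj_iter_cons, gaj_int_end]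
  simp [tree_generator, flatMap_sing]

theorem enum_map_range {α : Type} (g : Int → α) :
    ∀ (m : Nat) (a n : Int), (n - a).toNat = m →
      PySem.List.enumerate ((PySem.List.pyRange a n 1).map g) a
        = (PySem.List.pyRange a n 1).map (fun j => (j, g j)) := by
  intro m
  induction m with
  | zero =>
      intro a n h
      have hle : n ≤ a := by omega
      simp [PySem.List.pyRange_one_eq_nil hle]
  | succ k ih =>
      intro a n h
      have hlt : a < n := by omega
      rw [PySem.List.pyRange_one_cons hlt]
      simp only [List.map_cons, PySem.List.enumerate_cons]
      rw [ih (a + 1) n (by omega)]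

theorem int_output_eq (g : Int → String) (oc : Int) :
    generate_implicit_int_output ((PySem.List.pyRange 0 oc 1).map g)
      = "Sum(" ++ PySem.Str.join ",\n    " ((PySem.List.pyRange 0 oc 1).map (fun j =>
          "IntVal(" ++ PySem.Int.toStr (2 ^ j.toNat) ++ ") * And(p_o" ++ PySem.Int.toStr j ++ ", " ++ g j ++ ")")) ++ ")" := by
  rw [generate_implicit_int_output, gaj_iter_end, List.map_map,
      enum_map_range (PVal.str ∘ g) (oc - 0).toNat 0 oc rfl]
  simp [List.flatMap_map, int_output_generator, flatMap_sing]

-- ===== VERDICT (by name: the statement is the Claim_ definition above) =====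
theorem approximate_implicit_circuit_spec : Claim_equal_approximate_implicit_circuit := by
  intro tp ic oc _dom
  unfold Spec_approximate_implicit_circuit
  unfold approximate_implicit_circuit
  simp only [PySem.List.foldl_append_singleton_eq_map, List.nil_append]
  rw [int_output_eq]
  simp only [tree_eq]
  rfl
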